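-- pv_equiv track=rewrite | github.com/pradyun1611/curve-digitisation | core/bw_graph.py | _snap_to_node
-- ===== SOURCE A (Python) =====
-- from typing import Any, Dict, List, Optional, Set, Tuple
--
-- def _snap_to_node(
--     point: Tuple[int, int],
--     graph: Dict[Tuple[int, int], List[Tuple[int, int]]],
--     radius: int = 20,
-- ) -> Optional[Tuple[int, int]]:
--     """Snap a point to the nearest graph node within *radius*."""
--     if point in graph:
--         return point
--
--     best: Optional[Tuple[int, int]] = None
--     best_dist = float("inf")
--     px, py = point
--
--     for node in graph:
--         dx = node[0] - px
--         dy = node[1] - py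
--         dist = dx * dx + dy * dy
--         if dist < best_dist and dist <= radius * radius:
--             best_dist = dist
--             best = node
--
--     return best
-- ===== SOURCE B (Python) =====
-- from typing import Dict, List, Optional, Tuple
--
-- def _snap_to_node(
--     point: Tuple[int, int],
--     graph: Dict[Tuple[int, int], List[Tuple[int, int]]],
--     radius: int = 20,
-- ) -> Optional[Tuple[int, int]]:
--     """Snap via sort: order all nodes by squared distance (stable, so the first
--     occurrence wins ties like A's strict '<'), then accept the head iff in radius."""
--     if point in graph:
--         return point
--     px, py = point
--     ranked = sorted(graph, key=lambda n: (n[0] - px) ** 2 + (n[1] - py) ** 2)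
--     if not ranked:
--         return None
--     n = ranked[0]
--     return n if (n[0] - px) ** 2 + (n[1] - py) ** 2 <= radius * radius else None
-- ===== Notes on version B (the rewrite author's own statement) =====
-- stated objective: alternative
-- what changed: Replaced A's single running-best scan with its in-radius test inside the loop by a sort-based algorithm: stably sort all nodes by squared distance, take the head (the first globally nearest node), and return it iff it lies within the radius; correct because the in-radius minimum, when it exists, is the global minimum.
import Mathlib
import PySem

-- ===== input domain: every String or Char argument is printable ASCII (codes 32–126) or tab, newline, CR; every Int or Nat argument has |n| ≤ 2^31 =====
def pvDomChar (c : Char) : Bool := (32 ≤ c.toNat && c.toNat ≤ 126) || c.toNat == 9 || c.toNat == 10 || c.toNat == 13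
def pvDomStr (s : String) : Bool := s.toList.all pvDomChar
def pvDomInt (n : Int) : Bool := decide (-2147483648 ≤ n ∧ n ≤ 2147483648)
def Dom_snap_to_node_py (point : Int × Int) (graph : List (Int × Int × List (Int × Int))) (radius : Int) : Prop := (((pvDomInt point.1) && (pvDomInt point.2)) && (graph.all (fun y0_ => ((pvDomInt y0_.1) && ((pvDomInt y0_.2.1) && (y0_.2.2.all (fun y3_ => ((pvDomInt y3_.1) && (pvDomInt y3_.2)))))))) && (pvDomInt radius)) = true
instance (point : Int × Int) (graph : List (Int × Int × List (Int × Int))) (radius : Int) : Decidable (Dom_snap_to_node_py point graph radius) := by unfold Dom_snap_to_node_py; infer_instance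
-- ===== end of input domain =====

-- B replaces A's running-best scan by sort-by-squared-distance then a radius check on the head; objective: alternative.


-- ===== PORT A =====
-- one iteration of A's 'for node in graph' loop, state = (best, best_dist); best_dist none ↔ float("inf")
def snapStep (px py radius : Int) (st : Option (Int × Int) × Option Int) (node : Int × Int × List (Int × Int)) : Option (Int × Int) × Option Int :=
  let dx := node.1 - px
  let dy := node.2.1 - py
  let dist := dx * dx + dy * dy
  -- 'dist < best_dist' with best_dist = float("inf") is true while best_dist is none
  let lt : Bool := match st.2 with | none => true | some d => decide (dist < d)
  if lt && decide (dist ≤ radius * radius) then (some (node.1, node.2.1), some dist) else st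

def snap_to_node_py (point : Int × Int) (graph : List (Int × Int × List (Int × Int))) (radius : Int) : Option (Int × Int) :=
  if (graph.map (fun e => (e.1, e.2.1))).contains point then some point
  else (graph.foldl (snapStep point.1 point.2 radius) (none, none)).1

-- ===== PORT B =====
def snap_to_node_py_alt (point : Int × Int) (graph : List (Int × Int × List (Int × Int))) (radius : Int) : Option (Int × Int) :=
  if (graph.map (fun e => (e.1, e.2.1))).contains point then some point
  else
    let px := point.1
    let py := point.2
    -- ranked = sorted(graph, key=squared distance)  (stable sort, Python's sorted)
    let ranked := PySem.List.sorted (graph.map (fun e => (e.1, e.2.1)))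
      (fun n => (n.1 - px) * (n.1 - px) + (n.2 - py) * (n.2 - py))
    -- 'if not ranked: return None' then 'n = ranked[0]; return n if dist(n) <= r*r else None'
    match ranked.head? with
    | none => none
    | some n => if (n.1 - px) * (n.1 - px) + (n.2 - py) * (n.2 - py) ≤ radius * radius then some n else none

-- ===== PRECONDITION & SPEC =====
def Spec_snap_to_node_py (point : Int × Int) (graph : List (Int × Int × List (Int × Int))) (radius : Int) (out : Option (Int × Int)) : Prop := out = snap_to_node_py_alt point graph radius
instance (point : Int × Int) (graph : List (Int × Int × List (Int × Int))) (radius : Int) (out : Option (Int × Int)) : Decidable (Spec_snap_to_node_py point graph radius out) := by unfold Spec_snap_to_node_py; infer_instance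

-- ===== CLAIM =====
def Claim_equal_snap_to_node_py : Prop := ∀ (point : Int × Int) (graph : List (Int × Int × List (Int × Int))) (radius : Int), Dom_snap_to_node_py point graph radius → Spec_snap_to_node_py point graph radius (snap_to_node_py point graph radius)

-- ===== LEMMAS AND PROOFS =====

-- squared distance of a node to (px, py)
def sqdP (px py : Int) (n : Int × Int) : Int := (n.1 - px) * (n.1 - px) + (n.2 - py) * (n.2 - py)

-- the fold step underlying PySem.List.min?
def mstep (key : (Int × Int) → Int) (acc : Option (Int × Int)) (y : Int × Int) : Option (Int × Int) :=
  match acc with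
  | none => some y
  | some m => if key y < key m then some y else some m

lemma min?_eq_foldl (key : (Int × Int) → Int) (l : List (Int × Int)) :
    PySem.List.min? l key = l.foldl (mstep key) none := by
  simp only [PySem.List.min?]
  congr 1
  funext acc y
  cases acc <;> simp [mstep]

lemma foldl_mstep_some (key : (Int × Int) → Int) (t : List (Int × Int)) :
    ∀ x, t.foldl (mstep key) (some x)
      = match t.foldl (mstep key) none with
        | none => some x
        | some m => if key m < key x then some m else some x := by
  induction t with
  | nil => intro x; simp
  | cons y t ih =>
    intro x
    simp only [List.foldl_cons, mstep]
    by_cases h : key y < key x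
    · rw [if_pos h, ih y]
      rcases hM : t.foldl (mstep key) none with _ | m
      all_goals dsimp only
      · show (some y : Option (Int × Int)) = if key y < key x then some y else some x
        rw [if_pos h]
      · by_cases h2 : key m < key y
        · rw [if_pos h2]
          show (some m : Option (Int × Int)) = if key m < key x then some m else some x
          rw [if_pos (lt_trans h2 h)]
        · rw [if_neg h2]
          show (some y : Option (Int × Int)) = if key y < key x then some y else some x
          rw [if_pos h]
    · rw [if_neg h, ih x, ih y]
      rcases hM : t.foldl (mstep key) none with _ | m
      all_goals dsimp only
      · show (some x : Option (Int × Int)) = if key y < key x then some y else some x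
        rw [if_neg h]
      · by_cases h2 : key m < key y
        · rw [if_pos h2]
        · rw [if_neg h2]
          show (if key m < key x then some m else some x)
              = if key y < key x then some y else some x
          rw [if_neg (show ¬ key m < key x by omega), if_neg h]

lemma min?_cons (key : (Int × Int) → Int) (x : Int × Int) (t : List (Int × Int)) :
    PySem.List.min? (x :: t) key
      = match PySem.List.min? t key with
        | none => some x
        | some m => if key m < key x then some m else some x := by
  rw [min?_eq_foldl, min?_eq_foldl, List.foldl_cons]
  show t.foldl (mstep key) (some x) = _
  exact foldl_mstep_some key t x

-- min over the in-radius candidates = global min, gated by the radius check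
lemma min?_filter_le (key : (Int × Int) → Int) (c : Int) (l : List (Int × Int)) :
    PySem.List.min? (l.filter (fun n => decide (key n ≤ c))) key
      = match PySem.List.min? l key with
        | none => none
        | some m => if key m ≤ c then some m else none := by
  induction l with
  | nil => simp [PySem.List.min?]
  | cons x t ih =>
    rw [List.filter_cons, min?_cons key x t]
    by_cases hx : key x ≤ c
    · rw [if_pos (by simpa using hx), min?_cons]
      rw [ih]
      rcases hM : PySem.List.min? t key with _ | m
      · simp [hx]
      · by_cases hm : key m ≤ c
        · simp only [if_pos hm]
          by_cases h2 : key m < key x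
          · simp [h2, hm]
          · simp [h2, hx]
        · simp only [if_neg hm]
          have h2 : ¬ key m < key x := by omega
          simp [h2, hx]
    · rw [if_neg (by simpa using hx)]
      rw [ih]
      rcases hM : PySem.List.min? t key with _ | m
      · simp [hx]
      · by_cases hm : key m ≤ c
        · have h2 : key m < key x := by omega
          simp [h2, hm]
        · by_cases h2 : key m < key x
          · simp [h2, hm]
          · simp [h2, hm, hx]

lemma head?_insertBy (bef : (Int × Int) → (Int × Int) → Bool) (x : Int × Int) (l : List (Int × Int)) :
    (PySem.List.insertBy bef x l).head?
      = match l.head? with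
        | none => some x
        | some y => if bef x y then some x else some y := by
  cases l with
  | nil => simp [PySem.List.insertBy]
  | cons y ys =>
    simp only [PySem.List.insertBy, List.head?_cons]
    by_cases h : bef x y
    · simp [h]
    · simp [h]

-- first minimum = head of Python's stable sort
lemma min?_eq_head_sorted (key : (Int × Int) → Int) (l : List (Int × Int)) :
    PySem.List.min? l key = (PySem.List.sorted l key).head? := by
  induction l using List.reverseRecOn with
  | nil => simp [PySem.List.min?, PySem.List.sorted]
  | append_singleton xs x ih =>
    rw [PySem.List.sorted_eq_foldl_insertBy, List.foldl_append, List.foldl_cons, List.foldl_nil,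
        ← PySem.List.sorted_eq_foldl_insertBy, head?_insertBy, ← ih]
    rw [min?_eq_foldl, List.foldl_append, List.foldl_cons, List.foldl_nil, ← min?_eq_foldl]
    rcases hM : PySem.List.min? xs key with _ | m
    · simp [mstep]
    · simp only [mstep]
      by_cases h : key x < key m <;> simp [h]

-- step lemmas: how one iteration of A's loop acts on each shape of state
lemma snapStep_far (px py radius : Int) (st : Option (Int × Int) × Option Int) (e : Int × Int × List (Int × Int))
    (hle : ¬ sqdP px py (e.1, e.2.1) ≤ radius * radius) :
    snapStep px py radius st e = st := by
  simp [sqdP] at hle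
  simp [snapStep, hle]

lemma snapStep_none (px py radius : Int) (e : Int × Int × List (Int × Int))
    (hle : sqdP px py (e.1, e.2.1) ≤ radius * radius) :
    snapStep px py radius (none, none) e = (some (e.1, e.2.1), some (sqdP px py (e.1, e.2.1))) := by
  simp [sqdP] at hle
  simp [snapStep, sqdP, hle]

lemma snapStep_some_lt (px py radius : Int) (m : Int × Int) (e : Int × Int × List (Int × Int))
    (hle : sqdP px py (e.1, e.2.1) ≤ radius * radius) (hlt : sqdP px py (e.1, e.2.1) < sqdP px py m) :
    snapStep px py radius (some m, some (sqdP px py m)) e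
      = (some (e.1, e.2.1), some (sqdP px py (e.1, e.2.1))) := by
  simp [sqdP] at hle hlt
  simp [snapStep, sqdP, hle, hlt]

lemma snapStep_some_ge (px py radius : Int) (m : Int × Int) (e : Int × Int × List (Int × Int))
    (hlt : ¬ sqdP px py (e.1, e.2.1) < sqdP px py m) :
    snapStep px py radius (some m, some (sqdP px py m)) e = (some m, some (sqdP px py m)) := by
  simp [sqdP] at hlt
  simp [snapStep, sqdP, hlt]

-- min? (Python min, first minimum): a strictly smaller head takes over / a not-smaller second is dropped
lemma min?_cons_lt (px py : Int) (m k : Int × Int) (l : List (Int × Int))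
    (hlt : sqdP px py k < sqdP px py m) :
    PySem.List.min? (m :: k :: l) (sqdP px py) = PySem.List.min? (k :: l) (sqdP px py) := by
  simp [PySem.List.min?, List.foldl_cons, hlt]

lemma min?_cons_ge (px py : Int) (m k : Int × Int) (l : List (Int × Int))
    (hlt : ¬ sqdP px py k < sqdP px py m) :
    PySem.List.min? (m :: k :: l) (sqdP px py) = PySem.List.min? (m :: l) (sqdP px py) := by
  simp [PySem.List.min?, List.foldl_cons, hlt]

-- A's running-best fold equals min? of the accumulator followed by the in-radius candidates
lemma snap_fold_eq (px py radius : Int) (graph : List (Int × Int × List (Int × Int))) :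
    ∀ acc : Option (Int × Int),
    (graph.foldl (snapStep px py radius) (acc, acc.map (sqdP px py))).1
    = PySem.List.min?
        (acc.toList ++ (graph.map (fun e => (e.1, e.2.1))).filter
          (fun n => decide (sqdP px py n ≤ radius * radius)))
        (sqdP px py) := by
  induction graph with
  | nil =>
    intro acc
    cases acc <;> simp [PySem.List.min?]
  | cons e t ih =>
    intro acc
    simp only [List.foldl_cons, List.map_cons, List.filter_cons]
    by_cases hle : sqdP px py (e.1, e.2.1) ≤ radius * radius
    · cases acc with
      | none =>
        rw [show (Option.map (sqdP px py) (none : Option (Int × Int))) = none from rfl,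
            snapStep_none px py radius e hle]
        have h := ih (some (e.1, e.2.1))
        simp only [Option.toList, Option.map_some, List.cons_append, List.nil_append] at h ⊢
        simpa [hle] using h
      | some m =>
        simp only [Option.toList, Option.map_some, List.cons_append, List.nil_append]
        by_cases hlt : sqdP px py (e.1, e.2.1) < sqdP px py m
        · rw [snapStep_some_lt px py radius m e hle hlt]
          have h := ih (some (e.1, e.2.1))
          simp only [Option.toList, Option.map_some, List.cons_append, List.nil_append] at h
          rw [if_pos (by simpa using hle), min?_cons_lt px py m (e.1, e.2.1) _ hlt]
          simpa using h
        · rw [snapStep_some_ge px py radius m e hlt]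
          have h := ih (some m)
          simp only [Option.toList, Option.map_some, List.cons_append, List.nil_append] at h
          rw [if_pos (by simpa using hle), min?_cons_ge px py m (e.1, e.2.1) _ hlt]
          simpa using h
    · rw [snapStep_far px py radius _ e hle]
      have h := ih acc
      simpa [hle] using h

-- ===== VERDICT =====
theorem snap_to_node_py_spec : Claim_equal_snap_to_node_py := by
  intro point graph radius _
  unfold Spec_snap_to_node_py snap_to_node_py snap_to_node_py_alt
  by_cases hmem : (graph.map (fun e => (e.1, e.2.1))).contains point
  · rw [if_pos hmem, if_pos hmem]
  · rw [if_neg hmem, if_neg hmem]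
    have hA := snap_fold_eq point.1 point.2 radius graph none
    simp only [Option.toList, Option.map_none, List.nil_append] at hA
    rw [hA, min?_filter_le (sqdP point.1 point.2) (radius * radius) (graph.map (fun e => (e.1, e.2.1)))]
    show _ = (match (PySem.List.sorted (graph.map (fun e => (e.1, e.2.1))) (sqdP point.1 point.2)).head? with
      | none => none
      | some n => if sqdP point.1 point.2 n ≤ radius * radius then some n else none)
    rw [← min?_eq_head_sorted (sqdP point.1 point.2)]
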